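-- pv_equiv track=rewrite | github.com/Praetorian-Defence/praetorian-api | apps/core/services/clean_log.py | _replace_with_prefix
-- ===== SOURCE A (Python) =====
-- def _replace_with_prefix(main_string, to_find, prefix_char):
--     output = []
--     i = 0
--     n = len(main_string)
--     m = len(to_find)
--
--     while i < n:
--         # If the next m characters match "to_find"
--         if main_string[i:i + m] == to_find:
--             output.append(prefix_char + to_find)
--             i += m  # Skip the length of to_find
--         else:
--             output.append(main_string[i])
--             i += 1
--
--     return ''.join(output)
-- ===== SOURCE B (Python) =====
-- def _replace_with_prefix(main_string, to_find, prefix_char):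
--     if not to_find:
--         return main_string
--     pieces = []
--     start = 0
--     while True:
--         idx = main_string.find(to_find, start)
--         if idx == -1:
--             pieces.append(main_string[start:])
--             break
--         pieces.append(main_string[start:idx])
--         pieces.append(prefix_char + to_find)
--         start = idx + len(to_find)
--     return ''.join(pieces)
-- ===== Notes on version B (the rewrite author's own statement) =====
-- stated objective: idiomatic
-- what changed: B loops over occurrences with str.find and a cursor (joining slices between matches) instead of A's character-by-character index loop with per-position slice comparison; B also returns immediately on an empty needle, where A's loop never terminates.
import Mathlib
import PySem

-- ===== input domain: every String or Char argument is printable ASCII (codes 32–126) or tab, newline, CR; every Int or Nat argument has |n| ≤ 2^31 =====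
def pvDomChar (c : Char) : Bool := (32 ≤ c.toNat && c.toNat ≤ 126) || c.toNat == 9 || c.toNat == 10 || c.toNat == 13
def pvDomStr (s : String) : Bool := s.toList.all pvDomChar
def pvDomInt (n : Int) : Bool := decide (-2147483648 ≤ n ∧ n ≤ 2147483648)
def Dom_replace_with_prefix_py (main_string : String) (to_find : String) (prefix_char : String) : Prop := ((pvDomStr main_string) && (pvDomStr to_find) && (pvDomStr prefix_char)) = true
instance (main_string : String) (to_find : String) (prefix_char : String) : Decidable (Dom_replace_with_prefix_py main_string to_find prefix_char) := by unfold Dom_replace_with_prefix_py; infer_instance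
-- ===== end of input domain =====

-- B scans occurrence-by-occurrence with str.find instead of A's character loop (idiomatic);
-- equal wherever A terminates; B additionally returns (main_string) on the empty needle, where A loops forever.

-- ===== PORT A =====
-- A's while-loop: out accumulates the appended pieces in order.  The fuel (n+1) only makes the
-- recursion total: each iteration advances i by ≥ 1 whenever to_find ≠ "" (the to_find = "" ∧
-- main_string ≠ "" inputs, where Python A loops forever, are outside Pre_).
def pvLoopA (t p : List Char) : Nat → List Char → List (List Char) → List (List Char)
  | 0, _, out => out
  | fuel+1, rest, out =>
    match rest with
    | [] => out                                       -- i = n: the while-loop ends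
    | c :: rest' =>
      if (c :: rest').take t.length = t then          -- main_string[i:i+m] == to_find  (exact: 0 ≤ i)
        pvLoopA t p fuel ((c :: rest').drop t.length) ((p ++ t) :: out)
      else
        pvLoopA t p fuel rest' ([c] :: out)           -- main_string[i], then i += 1

def replace_with_prefix_py (main_string : String) (to_find : String) (prefix_char : String) : String :=
  String.mk (List.flatten (pvLoopA to_find.toList prefix_char.toList
    (main_string.toList.length + 1) main_string.toList []).reverse)

-- ===== PORT B =====
-- B's while True loop over str.find; pieces accumulates the slices.  Fuel (n+1) makes it total:
-- with to_find ≠ "" the cursor advances past each found occurrence.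
def pvLoopB (s t p : List Char) : Nat → Nat → List (List Char) → List (List Char)
  | 0, _, pieces => pieces
  | fuel+1, start, pieces =>
    let idx := PySem.Chars.findFrom s t (start : Int) none          -- main_string.find(to_find, start)
    if idx = -1 then (s.drop start) :: pieces                        -- main_string[start:]
    else pvLoopB s t p fuel (idx.toNat + t.length)
      ((p ++ t) ::                                                   -- prefix_char + to_find
       ((s.drop start).take (idx.toNat - start)) ::                  -- main_string[start:idx]
       pieces)

def replace_with_prefix_py_alt (main_string : String) (to_find : String) (prefix_char : String) : String :=
  if to_find = "" then main_string
  else String.mk (List.flatten (pvLoopB main_string.toList to_find.toList prefix_char.toList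
    (main_string.toList.length + 1) 0 []).reverse)

-- ===== PRECONDITION & SPEC =====
-- Pre_ excludes ONLY inputs on which Python A never returns: with to_find = "" and main_string ≠ ""
-- A's loop matches the empty slice at every position and advances i by 0 forever (infinite loop).
def Pre_replace_with_prefix_py (main_string : String) (to_find : String) (prefix_char : String) : Prop :=
  to_find = "" → main_string = ""
instance (main_string : String) (to_find : String) (prefix_char : String) : Decidable (Pre_replace_with_prefix_py main_string to_find prefix_char) := by unfold Pre_replace_with_prefix_py; infer_instance

def pvWitness_replace_with_prefix_py : String × String × String := ("error: log failure log", "log", "#")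

def Spec_replace_with_prefix_py (main_string : String) (to_find : String) (prefix_char : String) (out : String) : Prop := out = replace_with_prefix_py_alt main_string to_find prefix_char
instance (main_string : String) (to_find : String) (prefix_char : String) (out : String) : Decidable (Spec_replace_with_prefix_py main_string to_find prefix_char out) := by unfold Spec_replace_with_prefix_py; infer_instance

-- ===== CLAIM (what is proved, stated in full; the proofs are below) =====
def Claim_equal_replace_with_prefix_py : Prop := ∀ (main_string : String) (to_find : String) (prefix_char : String), Dom_replace_with_prefix_py main_string to_find prefix_char → Pre_replace_with_prefix_py main_string to_find prefix_char → Spec_replace_with_prefix_py main_string to_find prefix_char (replace_with_prefix_py main_string to_find prefix_char)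

-- ===== LEMMAS AND PROOFS =====

-- The common "value from position i" function, with fuel (identical recursion shape to pvLoopA).
def pvSpecF (s t p : List Char) : Nat → Nat → List Char
  | 0, _ => []
  | fuel+1, i =>
    if i < s.length then
      if (s.drop i).take t.length = t then p ++ t ++ pvSpecF s t p fuel (i + t.length)
      else (s.drop i).take 1 ++ pvSpecF s t p fuel (i + 1)
    else []

theorem pvLoopA_flatten (s t p : List Char) : ∀ (fuel i : Nat) (out : List (List Char)),
    (pvLoopA t p fuel (s.drop i) out).reverse.flatten
      = out.reverse.flatten ++ pvSpecF s t p fuel i := by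
  intro fuel
  induction fuel with
  | zero => intro i out; simp [pvLoopA, pvSpecF]
  | succ f ih =>
    intro i out
    cases hrest : s.drop i with
    | nil =>
      have hin : ¬ i < s.length := by
        have := List.drop_eq_nil_iff.mp hrest; omega
      simp only [pvLoopA, pvSpecF]
      rw [if_neg hin]
      simp
    | cons c r =>
      have hin : i < s.length := by
        by_contra h
        rw [List.drop_eq_nil_of_le (by omega)] at hrest; simp at hrest
      have hdropm : (c :: r).drop t.length = s.drop (i + t.length) := by
        rw [← hrest, List.drop_drop]
      have hdrop1 : r = s.drop (i + 1) := by
        have : (c :: r).drop 1 = s.drop (i + 1) := by rw [← hrest, List.drop_drop]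
        simpa using this
      simp only [pvLoopA, pvSpecF]
      rw [if_pos hin, hrest]
      split_ifs with hm
      · rw [hdropm, ih (i + t.length)]
        simp [List.append_assoc]
      · rw [hdrop1, ih (i + 1), ← hdrop1]
        simp [List.append_assoc]

theorem pvSpecF_congr (s t p : List Char) (ht : t ≠ []) : ∀ (f1 f2 i : Nat),
    s.length - i ≤ f1 → s.length - i ≤ f2 → pvSpecF s t p f1 i = pvSpecF s t p f2 i := by
  intro f1
  induction f1 with
  | zero =>
    intro f2 i h1 h2
    cases f2 with
    | zero => rfl
    | succ f2' => simp only [pvSpecF]; rw [if_neg (by omega)]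
  | succ f1' ih =>
    intro f2 i h1 h2
    cases f2 with
    | zero => simp only [pvSpecF]; rw [if_neg (by omega)]
    | succ f2' =>
      have hm : 1 ≤ t.length := List.length_pos_iff.mpr ht
      simp only [pvSpecF]
      split_ifs with hi hmatch
      · rw [ih f2' (i + t.length) (by omega) (by omega)]
      · rw [ih f2' (i + 1) (by omega) (by omega)]
      · rfl

theorem pvSpecF_of_no_match (s t p : List Char) (ht : t ≠ []) : ∀ (fuel i : Nat),
    s.length - i ≤ fuel → (∀ j, i ≤ j → ¬ t <+: s.drop j) →
    pvSpecF s t p fuel i = s.drop i := by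
  intro fuel
  induction fuel with
  | zero =>
    intro i h1 _
    rw [List.drop_eq_nil_of_le (by omega)]; rfl
  | succ f ih =>
    intro i h1 H
    simp only [pvSpecF]
    split_ifs with hi hmatch
    · exact absurd (hmatch ▸ List.take_prefix t.length (s.drop i)) (H i le_rfl)
    · rw [ih (i + 1) (by omega) (fun j hj => H j (by omega)),
        List.drop_eq_getElem_cons hi]
      simp
    · rw [List.drop_eq_nil_of_le (by omega)]

theorem pvSpecF_skip (s t p : List Char) (ht : t ≠ []) : ∀ (fuel i idx : Nat),
    s.length - i ≤ fuel → i ≤ idx → t <+: s.drop idx →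
    (∀ j, i ≤ j → j < idx → ¬ t <+: s.drop j) →
    pvSpecF s t p fuel i
      = (s.drop i).take (idx - i) ++ (p ++ t)
        ++ pvSpecF s t p (s.length - (idx + t.length)) (idx + t.length) := by
  intro fuel
  induction fuel with
  | zero =>
    intro i idx h1 h2 hmatch _
    exfalso
    have : s.drop idx = [] := List.drop_eq_nil_of_le (by omega)
    rw [this, List.prefix_nil] at hmatch
    exact ht hmatch
  | succ f ih =>
    intro i idx h1 h2 hmatch hfirst
    have hm : 1 ≤ t.length := List.length_pos_iff.mpr ht
    have hroom : idx + t.length ≤ s.length := by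
      have := hmatch.length_le
      simp [List.length_drop] at this
      omega
    have hi : i < s.length := by omega
    rcases Nat.eq_or_lt_of_le h2 with heq | hlt
    · subst heq
      simp only [pvSpecF]
      rw [if_pos hi, if_pos (List.prefix_iff_eq_take.mp hmatch).symm]
      rw [pvSpecF_congr s t p ht f (s.length - (i + t.length)) (i + t.length) (by omega) (by omega)]
      simp [List.append_assoc]
    · simp only [pvSpecF]
      rw [if_pos hi, if_neg ?_]
      · rw [ih (i + 1) idx (by omega) (by omega) hmatch (fun j hj hj' => hfirst j (by omega) hj')]
        have hsplit : List.take (idx - i) (List.drop i s)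
            = List.take 1 (List.drop i s) ++ List.take (idx - (i + 1)) (List.drop (i + 1) s) := by
          rw [List.drop_eq_getElem_cons hi]
          have h' : idx - i = (idx - (i + 1)) + 1 := by omega
          rw [h', List.take_succ_cons]
          rfl
        rw [hsplit]
        simp only [List.append_assoc]
      · intro hcontr
        exact hfirst i le_rfl hlt (hcontr ▸ List.take_prefix t.length (s.drop i))

-- a prefix of a later drop is an infix of the earlier drop
theorem pvPrefix_drop_infix (s t : List Char) (a j : Nat) (hj : a ≤ j)
    (h : t <+: s.drop j) : t <:+: s.drop a := by
  have : s.drop j = (s.drop a).drop (j - a) := by rw [List.drop_drop]; congr 1; omega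
  rw [this] at h
  obtain ⟨u, hu⟩ := h
  obtain ⟨v, hv⟩ := List.drop_suffix (j - a) (s.drop a)
  exact ⟨v, u, by rw [List.append_assoc, hu, hv]⟩

theorem pvLoopB_flatten (s t p : List Char) (ht : t ≠ []) : ∀ (fuel start : Nat)
    (pieces : List (List Char)), start ≤ s.length → s.length - start < fuel →
    (pvLoopB s t p fuel start pieces).reverse.flatten
      = pieces.reverse.flatten ++ pvSpecF s t p (s.length - start) start := by
  intro fuel
  induction fuel with
  | zero => intro start pieces h1 h2; omega
  | succ f ih =>
    intro start pieces h1 h2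
    have hm : 1 ≤ t.length := List.length_pos_iff.mpr ht
    simp only [pvLoopB]
    split_ifs with hneg
    · -- no occurrence at or after start
      have hno : ¬ t <:+: s.drop start :=
        (PySem.Chars.findFrom_natCast_eq_neg_one_iff s t start h1).mp hneg
      rw [pvSpecF_of_no_match s t p ht _ _ le_rfl
        (fun j hj hpre => hno (pvPrefix_drop_infix s t start j hj hpre))]
      simp [List.append_assoc]
    · obtain ⟨hge, hpre, hmin⟩ := PySem.Chars.findFrom_natCast_spec s t start h1 hneg
      set k := (PySem.Chars.findFrom s t (start : Int) none).toNat with hk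
      have hge' : start ≤ k := by omega
      have hroom : k + t.length ≤ s.length := by
        have := hpre.length_le
        simp [List.length_drop] at this
        omega
      rw [pvSpecF_skip s t p ht (s.length - start) start k le_rfl hge' hpre
        (fun j hj hj' => hmin j (by omega) (by omega))]
      rw [ih (k + t.length) _ (by omega) (by omega)]
      simp [List.append_assoc]

-- ===== VERDICT (by name: the statement is the Claim_ definition above) =====
theorem replace_with_prefix_py_spec : Claim_equal_replace_with_prefix_py := by
  intro ms tf pc _ hpre
  unfold Spec_replace_with_prefix_py replace_with_prefix_py replace_with_prefix_py_alt
  by_cases htf : tf = ""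
  · have hms : ms = "" := hpre htf
    subst htf hms
    rfl
  · rw [if_neg htf]
    have ht : tf.toList ≠ [] := by
      intro h; exact htf (by rwa [← String.toList_eq_nil_iff])
    have hA := pvLoopA_flatten ms.toList tf.toList pc.toList (ms.toList.length + 1) 0 []
    rw [List.drop_zero] at hA
    rw [hA, pvLoopB_flatten ms.toList tf.toList pc.toList ht _ 0 []
      (Nat.zero_le _) (by omega)]
    rw [pvSpecF_congr ms.toList tf.toList pc.toList ht (ms.toList.length + 1)
      (ms.toList.length - 0) 0 (by omega) (by omega)]
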